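-- pv_equiv track=rewrite | github.com/Advanced-AIgpt/Yandex-Full-Source | alice/uniproxy/library/global_counter/uniproxy.py | asr_model_signals
-- ===== SOURCE A (Python) =====
-- def asr_model_signals(model):
--     """ Yields YASM signals for a given ASR model
--     """
--     for s in (
--         "asr_{}_200_summ",
--         "asr_{}_5xx_summ",
--         "asr_{}_client_timeout_summ",
--         "asr_{}_server_timeout_summ",
--         "asr_{}_pumpkin_200_summ",
--         "asr_{}_pumpkin_5xx_summ",
--         "asr_{}_pumpkin_client_timeout_summ",
--         "asr_{}_pumpkin_server_timeout_summ"
--     ):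
--         yield s.format(model)
-- ===== SOURCE B (Python) =====
-- def asr_model_signals(model):
--     """ Yields YASM signals for a given ASR model
--     """
--     for prefix in ("", "pumpkin_"):
--         for code in ("200", "5xx", "client_timeout", "server_timeout"):
--             yield "asr_" + model + "_" + prefix + code + "_summ"
-- ===== Notes on version B (the rewrite author's own statement) =====
-- stated objective: simpler
-- what changed: Replaces the flat list of 8 format templates by a nested product loop over prefixes ("", "pumpkin_") and outcome codes, yielding the same 8 strings in the same order.
import Mathlib
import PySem

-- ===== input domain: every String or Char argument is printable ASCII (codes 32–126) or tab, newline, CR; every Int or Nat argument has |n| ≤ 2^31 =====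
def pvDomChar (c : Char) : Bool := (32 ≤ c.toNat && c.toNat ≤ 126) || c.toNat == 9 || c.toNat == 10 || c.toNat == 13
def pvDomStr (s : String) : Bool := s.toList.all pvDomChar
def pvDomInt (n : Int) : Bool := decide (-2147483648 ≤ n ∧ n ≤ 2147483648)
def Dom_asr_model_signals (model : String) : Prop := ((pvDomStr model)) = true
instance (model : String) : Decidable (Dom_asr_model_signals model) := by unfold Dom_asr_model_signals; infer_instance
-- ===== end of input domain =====

-- B replaces A's flat list of 8 format templates by a nested product loop over
-- prefixes ("", "pumpkin_") and outcome codes — simpler decomposition, same 8 strings.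

-- ===== PORT A =====
-- Hand port of str.format for these templates: substitute the first "{}" with the
-- argument (exact here: each template has exactly one "{}" and no other braces).
def pyFormat1 : List Char → List Char → List Char
  | '{' :: '}' :: rest, m => m ++ rest
  | c :: rest, m => c :: pyFormat1 rest m
  | [], _ => []

-- Port of A: iterate over the eight templates, formatting each with `model`.
def asr_model_signals (model : String) : List String :=
  ["asr_{}_200_summ", "asr_{}_5xx_summ", "asr_{}_client_timeout_summ",
   "asr_{}_server_timeout_summ", "asr_{}_pumpkin_200_summ", "asr_{}_pumpkin_5xx_summ",
   "asr_{}_pumpkin_client_timeout_summ", "asr_{}_pumpkin_server_timeout_summ"].map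
    (fun s => String.ofList (pyFormat1 s.toList model.toList))

-- ===== PORT B =====
-- Port of B: nested product loop over prefixes and outcome codes, concatenation.
def asr_model_signals_alt (model : String) : List String :=
  ["", "pumpkin_"].flatMap (fun pre =>
    ["200", "5xx", "client_timeout", "server_timeout"].map (fun code =>
      "asr_" ++ model ++ "_" ++ pre ++ code ++ "_summ"))

-- ===== PRECONDITION & SPEC =====
def Spec_asr_model_signals (model : String) (out : List String) : Prop := out = asr_model_signals_alt model
instance (model : String) (out : List String) : Decidable (Spec_asr_model_signals model out) := by unfold Spec_asr_model_signals; infer_instance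

-- ===== CLAIM (what is proved, stated in full; the proofs are below) =====
def Claim_equal_asr_model_signals : Prop := ∀ (model : String), Dom_asr_model_signals model → Spec_asr_model_signals model (asr_model_signals model)

-- ===== LEMMAS AND PROOFS =====

-- ===== VERDICT (by name: the statement is the Claim_ definition above) =====
theorem asr_model_signals_spec : Claim_equal_asr_model_signals := by
  intro model _
  unfold Spec_asr_model_signals asr_model_signals asr_model_signals_alt
  simp [pyFormat1, ← String.toList_inj, String.toList_ofList]
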